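-- pv_equiv track=rewrite | github.com/JoseBlanca/seguimiento_covid | src/ministry_datasources.py | _extract_number_columns
-- ===== SOURCE A (Python) =====
-- def _extract_text(text, start, end=None):
--
--     start = text.find(start) + len(start)
--     if end is not None:
--         end = text[start:].find(end) + start
--
--     extracted_text = text[start: end]
--     return extracted_text
--
-- def _extract_number_columns(text, start_text, end_text=None):
--     items = _extract_text(text, start_text, end_text).split('\n')
--     column = []
--     columns = []
--     for item in items:
--         item = item.replace('.', ',').replace(',', '').strip()
--         if item.isdigit():
--             num = int(item)
--             column.append(num)
--         else:
--             if column: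
--                 columns.append(column[:])
--                 column = []
--     return columns
-- ===== SOURCE B (Python) =====
-- def _columns(norm):
--     # recursive: split at the first non-digit line; column before it, recurse after it.
--     for i, line in enumerate(norm):
--         if not line.isdigit():
--             rest = _columns(norm[i + 1:])
--             return ([[int(x) for x in norm[:i]]] + rest) if i else rest
--     return []  # a trailing digit run is never flushed by A, so it is dropped
--
-- def _extract_number_columns(text, start_text, end_text=None):
--     start = text.find(start_text) + len(start_text)
--     end = None if end_text is None else text[start:].find(end_text) + start
--     norm = [l.replace('.', ',').replace(',', '').strip()
--             for l in text[start:end].split('\n')]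
--     return _columns(norm)
-- ===== Notes on version B (the rewrite author's own statement) =====
-- stated objective: alternative
-- what changed: Replaces A's single-pass accumulator loop (pending column flushed on each non-digit line) with a recursive divide: find the first non-digit line, emit the slice before it as one column, and recurse on the slice after it; a run with no following non-digit line is dropped by the base case.
import Mathlib
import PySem

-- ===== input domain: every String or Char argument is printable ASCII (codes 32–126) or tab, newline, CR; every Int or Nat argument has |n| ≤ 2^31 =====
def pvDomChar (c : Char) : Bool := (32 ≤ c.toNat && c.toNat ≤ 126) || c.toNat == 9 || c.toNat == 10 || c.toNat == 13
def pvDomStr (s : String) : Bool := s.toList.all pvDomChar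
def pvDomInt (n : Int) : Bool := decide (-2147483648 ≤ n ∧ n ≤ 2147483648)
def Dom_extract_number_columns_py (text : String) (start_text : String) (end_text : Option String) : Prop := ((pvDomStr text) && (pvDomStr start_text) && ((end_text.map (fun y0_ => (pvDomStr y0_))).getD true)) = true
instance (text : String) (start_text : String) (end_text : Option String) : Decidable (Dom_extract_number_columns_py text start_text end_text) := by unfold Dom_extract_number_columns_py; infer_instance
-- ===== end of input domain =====

-- B replaces A's accumulator loop with a recursive divide at the first non-digit line
-- (slice before it = one column, recurse on the slice after it); objective: alternative.

-- ===== PORT A =====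
-- literal port of _extract_text
def extract_text_py (text : String) (start : String) (end_ : Option String) : String :=
  let start' : Int := PySem.Str.find text start + PySem.Str.len start
  let end' : Option Int :=
    end_.map (fun e => PySem.Str.find (PySem.Str.slice text (some start') none) e + start')
  PySem.Str.slice text (some start') end'

def extract_number_columns_py (text : String) (start_text : String) (end_text : Option String) : List (List Int) :=
  -- split('\n'): sep ≠ "" so split? is always `some`
  let items := (PySem.Str.split? (extract_text_py text start_text end_text) "\n").getD []
  (items.foldl (fun st item =>
      let item := PySem.Str.strip (PySem.Str.replace (PySem.Str.replace item "." ",") "," "")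
      if PySem.Str.strIsdigit item then
        -- int(item): guarded by isdigit so ofStr? is `some`; getD 0 is never the default here
        (st.1 ++ [(PySem.Int.ofStr? item).getD 0], st.2)
      else if st.1 ≠ [] then ([], st.2 ++ [st.1])
      else ([], st.2))
    (([] : List Int), ([] : List (List Int)))).2

-- ===== PORT B =====
-- line.replace('.', ',').replace(',', '').strip()
def pvNorm (s : String) : String :=
  PySem.Str.strip (PySem.Str.replace (PySem.Str.replace s "." ",") "," "")

-- _columns: the enumerate-scan returning at the first non-digit line is the findIdx? match;
-- norm[:i] / norm[i+1:] are take / drop (nonnegative Nat slices)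
def pvColumns (norm : List String) : List (List Int) :=
  match h : norm.findIdx? (fun l => !PySem.Str.strIsdigit l) with
  | none => []
  | some i =>
      let rest := pvColumns (norm.drop (i + 1))
      if i = 0 then rest
      else ((norm.take i).map (fun x => (PySem.Int.ofStr? x).getD 0)) :: rest
termination_by norm.length
decreasing_by
  have hne : norm ≠ [] := by
    intro hn; subst hn; simp [List.findIdx?, List.findIdx?.go] at h
  have : 0 < norm.length := List.length_pos_of_ne_nil hne
  simp [List.length_drop]; omega

def extract_number_columns_py_alt (text : String) (start_text : String) (end_text : Option String) : List (List Int) :=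
  let start : Int := PySem.Str.find text start_text + PySem.Str.len start_text
  let end_ : Option Int :=
    end_text.map (fun e => PySem.Str.find (PySem.Str.slice text (some start) none) e + start)
  let norm := ((PySem.Str.split? (PySem.Str.slice text (some start) end_) "\n").getD []).map pvNorm
  pvColumns norm

-- ===== PRECONDITION & SPEC =====
def Spec_extract_number_columns_py (text : String) (start_text : String) (end_text : Option String) (out : List (List Int)) : Prop := out = extract_number_columns_py_alt text start_text end_text
instance (text : String) (start_text : String) (end_text : Option String) (out : List (List Int)) : Decidable (Spec_extract_number_columns_py text start_text end_text out) := by unfold Spec_extract_number_columns_py; infer_instance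

-- ===== CLAIM (what is proved, stated in full; the proofs are below) =====
def Claim_equal_extract_number_columns_py : Prop := ∀ (text : String) (start_text : String) (end_text : Option String), Dom_extract_number_columns_py text start_text end_text → Spec_extract_number_columns_py text start_text end_text (extract_number_columns_py text start_text end_text)

-- ===== LEMMAS AND PROOFS =====

-- A's loop body, with the normalization factored out
def pvStepA (key : String → Bool) (t : String → Int)
    (st : List Int × List (List Int)) (x : String) : List Int × List (List Int) :=
  if key x then (st.1 ++ [t x], st.2)
  else if st.1 ≠ [] then ([], st.2 ++ [st.1])
  else ([], st.2)

-- A's "future output" given the pending column (structural on the line list)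
def pvHL (key : String → Bool) (t : String → Int) : List String → List Int → List (List Int)
  | [], _ => []
  | x :: xs, col =>
      if key x then pvHL key t xs (col ++ [t x])
      else (if col = [] then [] else [col]) ++ pvHL key t xs []

lemma pv_fold (key : String → Bool) (t : String → Int) :
    ∀ (xs : List String) (col : List Int) (cols : List (List Int)),
    (List.foldl (pvStepA key t) (col, cols) xs).2 = cols ++ pvHL key t xs col := by
  intro xs
  induction xs with
  | nil => intro col cols; simp [pvHL]
  | cons x xs ih =>
    intro col cols
    rw [List.foldl_cons]
    by_cases hk : key x
    · rw [show pvStepA key t (col, cols) x = (col ++ [t x], cols) by simp [pvStepA, hk]]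
      rw [ih]; simp [pvHL, hk]
    · by_cases hc : col = []
      · rw [show pvStepA key t (col, cols) x = ([], cols) by simp [pvStepA, hk, hc]]
        rw [ih]; simp [pvHL, hk, hc]
      · rw [show pvStepA key t (col, cols) x = ([], cols ++ [col]) by simp [pvStepA, hk, hc]]
        rw [ih]; simp [pvHL, hk, hc]

-- pvHL for the digit key, related to B's recursive slice-and-recurse
lemma pvHL_eq_columns :
    ∀ (xs : List String) (col : List Int),
      pvHL PySem.Str.strIsdigit (fun x => (PySem.Int.ofStr? x).getD 0) xs col =
        match xs.findIdx? (fun l => !PySem.Str.strIsdigit l) with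
        | none => []
        | some i =>
            let c := col ++ (xs.take i).map (fun x => (PySem.Int.ofStr? x).getD 0)
            let rest := pvColumns (xs.drop (i + 1))
            if c = [] then rest else c :: rest := by
  intro xs
  induction xs with
  | nil => intro col; simp [pvHL, List.findIdx?, List.findIdx?.go]
  | cons x xs ih =>
    intro col
    by_cases hk : PySem.Chars.strIsdigit x.toList = true
    · have hf : (x :: xs).findIdx? (fun l => !PySem.Str.strIsdigit l) =
          (xs.findIdx? (fun l => !PySem.Str.strIsdigit l)).map (· + 1) := by
        simp [List.findIdx?_cons, hk]
      rw [hf]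
      have h1 : pvHL PySem.Str.strIsdigit (fun x => (PySem.Int.ofStr? x).getD 0) (x :: xs) col =
          pvHL PySem.Str.strIsdigit (fun x => (PySem.Int.ofStr? x).getD 0) xs
            (col ++ [(PySem.Int.ofStr? x).getD 0]) := by simp [pvHL, hk]
      rw [h1, ih]
      cases hfx : xs.findIdx? (fun l => !PySem.Str.strIsdigit l) with
      | none => simp
      | some j => simp [List.append_assoc]
    · have hkf : PySem.Chars.strIsdigit x.toList = false := by
        simpa using hk
      have hf : (x :: xs).findIdx? (fun l => !PySem.Str.strIsdigit l) = some 0 := by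
        simp [List.findIdx?_cons, hkf]
      rw [hf]
      have h1 : pvHL PySem.Str.strIsdigit (fun x => (PySem.Int.ofStr? x).getD 0) (x :: xs) col =
          (if col = [] then [] else [col]) ++
            pvHL PySem.Str.strIsdigit (fun x => (PySem.Int.ofStr? x).getD 0) xs [] := by
        simp [pvHL, hkf]
      rw [h1, ih]
      have h2 : pvColumns xs =
          match xs.findIdx? (fun l => !PySem.Str.strIsdigit l) with
          | none => []
          | some i =>
              let c := ([] : List Int) ++ (xs.take i).map (fun x => (PySem.Int.ofStr? x).getD 0)
              let rest := pvColumns (xs.drop (i + 1))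
              if c = [] then rest else c :: rest := by
        rw [pvColumns]
        cases hfx : xs.findIdx? (fun l => !PySem.Str.strIsdigit l) with
        | none => rfl
        | some i =>
          have hne : xs ≠ [] := by
            intro hn; subst hn; simp [List.findIdx?, List.findIdx?.go] at hfx
          by_cases h0 : i = 0
          · subst h0; simp
          · simp [h0, hne]
      rw [← h2]
      by_cases hc : col = [] <;> simp [hc]

lemma pv_main (xs : List String) :
    (List.foldl (pvStepA PySem.Str.strIsdigit (fun x => (PySem.Int.ofStr? x).getD 0))
        (([] : List Int), ([] : List (List Int))) xs).2 = pvColumns xs := by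
  rw [pv_fold, pvHL_eq_columns]
  rw [pvColumns]
  cases hfx : xs.findIdx? (fun l => !PySem.Str.strIsdigit l) with
  | none => rfl
  | some i =>
    have hne : xs ≠ [] := by
      intro hn; subst hn; simp [List.findIdx?, List.findIdx?.go] at hfx
    by_cases h0 : i = 0
    · subst h0; simp
    · simp [h0, hne]

lemma pv_main' (xs : List String) :
    (List.foldl (fun st item =>
        pvStepA PySem.Str.strIsdigit (fun x => (PySem.Int.ofStr? x).getD 0) st (pvNorm item))
      (([] : List Int), ([] : List (List Int))) xs).2 = pvColumns (xs.map pvNorm) := by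
  rw [← List.foldl_map]
  exact pv_main _

-- ===== VERDICT (by name: the statement is the Claim_ definition above) =====
theorem extract_number_columns_py_spec : Claim_equal_extract_number_columns_py := by
  intro text start_text end_text _
  unfold Spec_extract_number_columns_py extract_number_columns_py extract_number_columns_py_alt
    extract_text_py
  have hstep : (fun (st : List Int × List (List Int)) (item : String) =>
      let item := PySem.Str.strip (PySem.Str.replace (PySem.Str.replace item "." ",") "," "")
      if PySem.Str.strIsdigit item then
        (st.1 ++ [(PySem.Int.ofStr? item).getD 0], st.2)
      else if st.1 ≠ [] then ([], st.2 ++ [st.1])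
      else ([], st.2)) =
      (fun st item =>
        pvStepA PySem.Str.strIsdigit (fun x => (PySem.Int.ofStr? x).getD 0) st (pvNorm item)) := rfl
  rw [hstep]
  exact pv_main' _
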